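-- pv_equiv track=rewrite | github.com/OldSumerian/SKY-bank-transaction-project | util/main.py | is_data_in_operation_list
-- ===== SOURCE A (Python) =====
-- def is_data_in_operation_list(executed_operation_list):
--     """
--     Функция проверяет наличие значений у позиций, подлежащих выводу
--     и при их отсутствии присваивает значение информационного характера
--     об отсутствии требуемых данных
--     :param executed_operation_list:
--     :return:
--     """
--     for i in executed_operation_list:
--         if 'date' not in i.keys():
--             i['date'] = 'данных о дате нет'
--         if 'description' not in i.keys():
--             i['description'] = 'сведений об описании операции нет'
--         if 'from' not in i.keys():
--             i['from'] = 'неизвестный номер карты/счета списания'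
--         if 'to' not in i.keys():
--             i['to'] = 'сведения о счете/карте зачисления отсутствуют'
--     return executed_operation_list
-- ===== SOURCE B (Python) =====
-- DEFAULTS = [
--     ('date', 'данных о дате нет'),
--     ('description', 'сведений об описании операции нет'),
--     ('from', 'неизвестный номер карты/счета списания'),
--     ('to', 'сведения о счете/карте зачисления отсутствуют'),
-- ]
--
--
-- def _first_wins(pairs):
--     """Rebuild a dict keeping, for each key, its first occurrence in pairs."""
--     merged = {}
--     for k, v in pairs:
--         if k not in merged:
--             merged[k] = v
--     return merged
--
--
-- def is_data_in_operation_list(executed_operation_list):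
--     # merge by concatenation + first-occurrence dedup: the operation's own
--     # pairs win over the defaults table, missing defaults land at the end
--     return [_first_wins(list(op.items()) + DEFAULTS)
--             for op in executed_operation_list]
-- ===== Notes on version B (the rewrite author's own statement) =====
-- stated objective: alternative
-- what changed: B builds each result dict by a first-occurrence-wins dedup fold over the concatenation op.items() + DEFAULTS (new dicts, no conditional insertion into the original), instead of A's four hard-coded membership-test-then-assign branches mutating each dict in place; Pre_ only excludes assoc lists with duplicate keys inside one operation, which cannot arise from a Python dict.
import Mathlib
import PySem

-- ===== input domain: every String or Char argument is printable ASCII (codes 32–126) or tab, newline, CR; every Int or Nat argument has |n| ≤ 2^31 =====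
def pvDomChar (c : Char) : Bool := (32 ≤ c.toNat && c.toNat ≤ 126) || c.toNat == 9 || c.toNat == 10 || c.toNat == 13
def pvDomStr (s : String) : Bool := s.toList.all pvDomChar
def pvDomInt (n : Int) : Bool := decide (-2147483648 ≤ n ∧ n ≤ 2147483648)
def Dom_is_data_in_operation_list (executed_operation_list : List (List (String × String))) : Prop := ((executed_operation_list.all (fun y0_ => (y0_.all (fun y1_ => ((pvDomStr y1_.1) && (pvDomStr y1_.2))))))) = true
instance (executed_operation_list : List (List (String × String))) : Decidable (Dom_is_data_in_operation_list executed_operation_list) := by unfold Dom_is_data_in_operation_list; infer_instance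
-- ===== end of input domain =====

-- B rebuilds each operation by a first-occurrence-wins dedup fold over op.items() + DEFAULTS
-- (objective: alternative). A mutates the given dicts in place and returns the same list; B builds
-- new dicts — the theorems here are about the RETURN value only.

-- ===== PORT A =====
-- 'k not in i.keys()' on an assoc-list dict: no pair with first component k
def pvHasKey (i : List (String × String)) (k : String) : Bool := i.any (fun p => p.1 == k)

-- the body of A's for-loop: four if-branches in source order, each appending the missing key
def pvAStep (i : List (String × String)) : List (String × String) :=
  let i := if pvHasKey i "date" then i else i ++ [("date", "данных о дате нет")]
  let i := if pvHasKey i "description" then i else i ++ [("description", "сведений об описании операции нет")]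
  let i := if pvHasKey i "from" then i else i ++ [("from", "неизвестный номер карты/счета списания")]
  let i := if pvHasKey i "to" then i else i ++ [("to", "сведения о счете/карте зачисления отсутствуют")]
  i

def is_data_in_operation_list (executed_operation_list : List (List (String × String))) : List (List (String × String)) :=
  executed_operation_list.map pvAStep

-- ===== PORT B =====
def pvDefaults : List (String × String) :=
  [("date", "данных о дате нет"),
   ("description", "сведений об описании операции нет"),
   ("from", "неизвестный номер карты/счета списания"),
   ("to", "сведения о счете/карте зачисления отсутствуют")]

-- one step of _first_wins: 'if k not in merged: merged[k] = v'
def pvDedupStep (merged : List (String × String)) (p : String × String) : List (String × String) :=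
  if merged.any (fun q => q.1 == p.1) then merged else merged ++ [p]

-- _first_wins(pairs): fold keeping the first occurrence of each key
def pvFirstWins (pairs : List (String × String)) : List (String × String) :=
  pairs.foldl pvDedupStep []

def is_data_in_operation_list_alt (executed_operation_list : List (List (String × String))) : List (List (String × String)) :=
  executed_operation_list.map (fun op => pvFirstWins (op ++ pvDefaults))

-- ===== PRECONDITION & SPEC =====
-- Pre_ excludes assoc lists in which one operation carries duplicate keys: such inputs do not
-- represent any Python dict (a dict's keys are distinct), so A never sees them.
def Pre_is_data_in_operation_list (executed_operation_list : List (List (String × String))) : Prop :=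
  ∀ op ∈ executed_operation_list, (op.map Prod.fst).Nodup
instance (executed_operation_list : List (List (String × String))) : Decidable (Pre_is_data_in_operation_list executed_operation_list) := by unfold Pre_is_data_in_operation_list; infer_instance

def pvWitness_is_data_in_operation_list : (List (List (String × String))) :=
  [[("date", "2020-01-01"), ("amount", "5")], []]

def Spec_is_data_in_operation_list (executed_operation_list : List (List (String × String))) (out : List (List (String × String))) : Prop := out = is_data_in_operation_list_alt executed_operation_list
instance (executed_operation_list : List (List (String × String))) (out : List (List (String × String))) : Decidable (Spec_is_data_in_operation_list executed_operation_list out) := by unfold Spec_is_data_in_operation_list; infer_instance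

-- ===== CLAIM (what is proved, stated in full; the proofs are below) =====
def Claim_equal_is_data_in_operation_list : Prop := ∀ (executed_operation_list : List (List (String × String))), Dom_is_data_in_operation_list executed_operation_list → Pre_is_data_in_operation_list executed_operation_list → Spec_is_data_in_operation_list executed_operation_list (is_data_in_operation_list executed_operation_list)

-- ===== LEMMAS AND PROOFS =====
-- the dedup fold leaves a duplicate-key-free prefix unchanged
lemma foldl_dedup_nodup (op : List (String × String)) : ∀ (acc : List (String × String)),
    (((acc ++ op).map Prod.fst).Nodup) → op.foldl pvDedupStep acc = acc ++ op := by
  induction op with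
  | nil => intro acc _; simp
  | cons p t ih =>
    intro acc h
    have hnot : acc.any (fun q => q.1 == p.1) = false := by
      simp only [List.any_eq_false, beq_iff_eq]
      intro q hq
      have hmem : q.1 ∈ acc.map Prod.fst := List.mem_map.2 ⟨q, hq, rfl⟩
      have hd := (List.nodup_append.1 (by simpa using h)).2.2
      exact fun hqe => hd q.1 hmem p.1 (by simp) hqe
    have h' : (((acc ++ [p]) ++ t).map Prod.fst).Nodup := by
      simpa [List.append_assoc] using h
    simp only [List.foldl_cons, pvDedupStep, hnot, Bool.false_eq_true]
    simpa [List.append_assoc] using ih (acc ++ [p]) h'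

lemma pvStep_eq (op : List (String × String)) (h : (op.map Prod.fst).Nodup) :
    pvFirstWins (op ++ pvDefaults) = pvAStep op := by
  unfold pvFirstWins
  rw [List.foldl_append, foldl_dedup_nodup op [] (by simpa using h)]
  simp only [List.nil_append, pvDefaults, List.foldl_cons, List.foldl_nil]
  unfold pvAStep pvHasKey pvDedupStep
  rfl

theorem is_data_in_operation_list_spec : Claim_equal_is_data_in_operation_list := by
  intro l _ hpre
  unfold Spec_is_data_in_operation_list is_data_in_operation_list is_data_in_operation_list_alt
  exact (List.map_congr_left fun op hop => (pvStep_eq op (hpre op hop)).symm)
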